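-- pv_equiv track=rewrite | github.com/RHIT-CSSE/csse120-public | Courseware/FromSVN/Grader/src/lines_of_code.py | remove_docstrings
-- ===== SOURCE A (Python) =====
-- def remove_docstrings(s):
--     """
--     Returns a copy of the string s, but with all docstrings removed.
--     It does NOT parse the file correctly for Python; instead,
--     it simply removes all characters between matched pairs of
--     triple-quotes (either single or double quotes).
--     """
--     IN_SINGLE_DOCSTRING = 0
--     IN_DOUBLE_DOCSTRING = 1
--     NOT_IN_DOCSTRING = 2
--
--     state = NOT_IN_DOCSTRING
--     result = ''
--     index = 0
--     while True:
--         if state == NOT_IN_DOCSTRING: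
--             new_index1 = s.find('"""', index)
--             new_index2 = s.find("'''", index)
--             if new_index1 == -1 and new_index2 == -1:
--                 result = result + s[index:]
--                 break
--             elif new_index2 == -1 or (new_index1 != -1 and new_index1 < new_index2):
--                 state = IN_DOUBLE_DOCSTRING
--                 new_index = new_index1
--             else:
--                 state = IN_SINGLE_DOCSTRING
--                 new_index = new_index2
--             result = result + s[index:new_index]
--         elif state == IN_SINGLE_DOCSTRING:
--             new_index = s.find("'''", index)
--             if new_index == -1:
--                 break
--             state = NOT_IN_DOCSTRING
--         else:
--             new_index = s.find('"""', index)
--             if new_index == -1: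
--                 break
--             state = NOT_IN_DOCSTRING
--         index = new_index + 3
--
--     return result
-- ===== SOURCE B (Python) =====
-- import re
--
-- # One regex substitution: in order, a terminated """ docstring, an unterminated
-- # """ run to end-of-string, then the ''' versions.  DOTALL so '.' crosses newlines.
-- _DOCSTRING_RE = re.compile(r'""".*?"""|""".*|\'\'\'.*?\'\'\'|\'\'\'.*', re.DOTALL)
--
--
-- def remove_docstrings(s):
--     return _DOCSTRING_RE.sub('', s)
-- ===== Notes on version B (the rewrite author's own statement) =====
-- stated objective: idiomatic
-- what changed: Replaces A's hand-written three-state while-loop scanner (explicit state constants, index bookkeeping, string accumulation) with a single compiled-regex substitution whose alternation (terminated docstring first, then unterminated-to-end, for each quote kind) reproduces the same removal in one re.sub call.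
import Mathlib
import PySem

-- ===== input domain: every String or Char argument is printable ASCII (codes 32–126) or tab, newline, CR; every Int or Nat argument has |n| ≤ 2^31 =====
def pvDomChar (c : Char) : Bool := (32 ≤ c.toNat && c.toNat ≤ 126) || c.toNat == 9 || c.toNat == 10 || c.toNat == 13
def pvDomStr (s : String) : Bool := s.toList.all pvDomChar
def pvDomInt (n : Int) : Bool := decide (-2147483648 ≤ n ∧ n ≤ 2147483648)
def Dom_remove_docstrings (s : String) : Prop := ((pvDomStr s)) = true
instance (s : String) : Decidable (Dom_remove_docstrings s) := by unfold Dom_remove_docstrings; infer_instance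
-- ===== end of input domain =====

-- B replaces A's three-state scanning loop by a single regex substitution (objective: idiomatic).

-- s.find(sub, k) with sub ≠ '' and result ≠ -1 starts at or after k and leaves room
-- for sub inside s (needed by the ports' termination proofs, hence stated above them).
theorem pvFindFrom_facts (s sub : List Char) (k : Nat) (hsub : sub ≠ [])
    (h : PySem.Chars.findFrom s sub (k : Int) ≠ -1) :
    k ≤ (PySem.Chars.findFrom s sub (k : Int)).toNat ∧
      (PySem.Chars.findFrom s sub (k : Int)).toNat + sub.length ≤ s.length := by
  by_cases hk : k ≤ s.length
  · obtain ⟨h1, h2, -⟩ := PySem.Chars.findFrom_natCast_spec s sub k hk h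
    have hlen := h2.length_le
    rw [List.length_drop] at hlen
    have hsl : 1 ≤ sub.length := List.length_pos_iff.mpr hsub
    constructor
    · omega
    · omega
  · exfalso
    apply h
    simp only [PySem.Chars.findFrom]
    have : ¬ ((k : Int) < 0) := by omega
    have h2 : (s.length : Int) < (k : Int) := by omega
    simp [this, h2]

-- ===== PORT A =====
-- Literal port of A's while-loop state machine; states IN_SINGLE=0, IN_DOUBLE=1,
-- NOT_IN=2; index is always ≥ 0 in A, kept as Nat (find results are .toNat'ed only
-- after the -1 check, exactly where Python knows them nonnegative).
def removeDocLoopA (s : List Char) (state : Int) (index : Nat) (result : List Char) :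
    List Char :=
  if state = 2 then
    let n1 := PySem.Chars.findFrom s ['"', '"', '"'] (index : Int)
    let n2 := PySem.Chars.findFrom s ['\'', '\'', '\''] (index : Int)
    if h0 : n1 = -1 ∧ n2 = -1 then
      result ++ s.drop index
    else if h1 : n2 = -1 ∨ (n1 ≠ -1 ∧ n1 < n2) then
      removeDocLoopA s 1 (n1.toNat + 3)
        (result ++ PySem.List.slice s (some (index : Int)) (some n1))
    else
      removeDocLoopA s 0 (n2.toNat + 3)
        (result ++ PySem.List.slice s (some (index : Int)) (some n2))
  else if state = 0 then
    let n := PySem.Chars.findFrom s ['\'', '\'', '\''] (index : Int)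
    if h2 : n = -1 then result
    else removeDocLoopA s 2 (n.toNat + 3) result
  else
    let n := PySem.Chars.findFrom s ['"', '"', '"'] (index : Int)
    if h3 : n = -1 then result
    else removeDocLoopA s 2 (n.toNat + 3) result
termination_by s.length + 3 - index
decreasing_by
  · have hne : PySem.Chars.findFrom s ['"', '"', '"'] (index : Int) ≠ -1 := by tauto
    have := pvFindFrom_facts s ['"', '"', '"'] index (by simp) hne
    simp at this ⊢; omega
  · have hne : PySem.Chars.findFrom s ['\'', '\'', '\''] (index : Int) ≠ -1 := by tauto
    have := pvFindFrom_facts s ['\'', '\'', '\''] index (by simp) hne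
    simp at this ⊢; omega
  · have := pvFindFrom_facts s ['\'', '\'', '\''] index (by simp) h2
    simp at this ⊢; omega
  · have := pvFindFrom_facts s ['"', '"', '"'] index (by simp) h3
    simp at this ⊢; omega

def remove_docstrings (s : String) : String :=
  String.ofList (removeDocLoopA s.toList 2 0 [])

-- ===== PORT B =====
-- B is one re.sub with pattern  """.*?"""|""".*|'''.*?'''|'''.*  under DOTALL.
-- PySem has no regex engine, so the sub is ported by hand and is exact FOR THIS
-- PATTERN: re.sub scans left to right; the leftmost match starts at the first
-- occurrence of """ or ''' (no position can start both); there the non-greedy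
-- terminated alternative matches up to the first closer of the same kind, else the
-- fallback alternative swallows the rest of the string; each match is replaced by
-- '' and scanning resumes right after it.
def removeDocGoB (s : List Char) (i : Nat) : List Char :=
  let n1 := PySem.Chars.findFrom s ['"', '"', '"'] (i : Int)
  let n2 := PySem.Chars.findFrom s ['\'', '\'', '\''] (i : Int)
  if h0 : n1 = -1 ∧ n2 = -1 then
    s.drop i
  else if h1 : n2 = -1 ∨ (n1 ≠ -1 ∧ n1 < n2) then
    let pre := PySem.List.slice s (some (i : Int)) (some n1)
    let c := PySem.Chars.findFrom s ['"', '"', '"'] ((n1.toNat + 3 : Nat) : Int)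
    if hc : c = -1 then pre else pre ++ removeDocGoB s (c.toNat + 3)
  else
    let pre := PySem.List.slice s (some (i : Int)) (some n2)
    let c := PySem.Chars.findFrom s ['\'', '\'', '\''] ((n2.toNat + 3 : Nat) : Int)
    if hc : c = -1 then pre else pre ++ removeDocGoB s (c.toNat + 3)
termination_by s.length + 3 - i
decreasing_by
  · have hn1 : PySem.Chars.findFrom s ['"', '"', '"'] (i : Int) ≠ -1 := by tauto
    have ha := pvFindFrom_facts s ['"', '"', '"'] i (by simp) hn1
    have hb := pvFindFrom_facts s ['"', '"', '"']
      ((PySem.Chars.findFrom s ['"', '"', '"'] (i : Int)).toNat + 3) (by simp) hc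
    omega
  · have hn2 : PySem.Chars.findFrom s ['\'', '\'', '\''] (i : Int) ≠ -1 := by tauto
    have ha := pvFindFrom_facts s ['\'', '\'', '\''] i (by simp) hn2
    have hb := pvFindFrom_facts s ['\'', '\'', '\'']
      ((PySem.Chars.findFrom s ['\'', '\'', '\''] (i : Int)).toNat + 3) (by simp) hc
    omega

def remove_docstrings_alt (s : String) : String :=
  String.ofList (removeDocGoB s.toList 0)

-- ===== PRECONDITION & SPEC =====
def Spec_remove_docstrings (s : String) (out : String) : Prop := out = remove_docstrings_alt s
instance (s : String) (out : String) : Decidable (Spec_remove_docstrings s out) := by unfold Spec_remove_docstrings; infer_instance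

-- ===== CLAIM (what is proved, stated in full; the proofs are below) =====
def Claim_equal_remove_docstrings : Prop := ∀ (s : String), Dom_remove_docstrings s → Spec_remove_docstrings s (remove_docstrings s)

-- ===== LEMMAS AND PROOFS =====

theorem loopA_eq_goB (s : List Char) (i : Nat) :
    ∀ result, removeDocLoopA s 2 i result = result ++ removeDocGoB s i := by
  refine removeDocGoB.induct s
    (motive := fun i => ∀ result, removeDocLoopA s 2 i result = result ++ removeDocGoB s i)
    ?_ ?_ ?_ ?_ ?_ i
  · intro i n1 n2 h0 result
    have H0 : PySem.Chars.findFrom s ['"', '"', '"'] (i : Int) = -1 ∧ PySem.Chars.findFrom s ['\'', '\'', '\''] (i : Int) = -1 := h0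
    rw [removeDocLoopA.eq_def, removeDocGoB.eq_def]
    simp [H0]
  · intro i n1 n2 h0 h1 c hc result
    have H0 : ¬(PySem.Chars.findFrom s ['"', '"', '"'] (i : Int) = -1 ∧ PySem.Chars.findFrom s ['\'', '\'', '\''] (i : Int) = -1) := h0
    have H1 : PySem.Chars.findFrom s ['\'', '\'', '\''] (i : Int) = -1 ∨ PySem.Chars.findFrom s ['"', '"', '"'] (i : Int) ≠ -1 ∧ PySem.Chars.findFrom s ['"', '"', '"'] (i : Int) < PySem.Chars.findFrom s ['\'', '\'', '\''] (i : Int) := h1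
    have Hc : PySem.Chars.findFrom s ['"', '"', '"'] (((PySem.Chars.findFrom s ['"', '"', '"'] (i : Int)).toNat + 3 : Nat) : Int) = -1 := hc
    rw [removeDocLoopA.eq_def, removeDocGoB.eq_def]
    simp only [Int.reduceEq, reduceIte, dif_neg H0, dif_pos H1]
    rw [removeDocLoopA.eq_def]
    simp only [Int.reduceEq, reduceIte, dif_pos Hc]
  · intro i n1 n2 h0 h1 c hc ih result
    have H0 : ¬(PySem.Chars.findFrom s ['"', '"', '"'] (i : Int) = -1 ∧ PySem.Chars.findFrom s ['\'', '\'', '\''] (i : Int) = -1) := h0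
    have H1 : PySem.Chars.findFrom s ['\'', '\'', '\''] (i : Int) = -1 ∨ PySem.Chars.findFrom s ['"', '"', '"'] (i : Int) ≠ -1 ∧ PySem.Chars.findFrom s ['"', '"', '"'] (i : Int) < PySem.Chars.findFrom s ['\'', '\'', '\''] (i : Int) := h1
    have Hc : PySem.Chars.findFrom s ['"', '"', '"'] (((PySem.Chars.findFrom s ['"', '"', '"'] (i : Int)).toNat + 3 : Nat) : Int) ≠ -1 := hc
    have IH : ∀ r, removeDocLoopA s 2 ((PySem.Chars.findFrom s ['"', '"', '"'] (((PySem.Chars.findFrom s ['"', '"', '"'] (i : Int)).toNat + 3 : Nat) : Int)).toNat + 3) r =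
        r ++ removeDocGoB s ((PySem.Chars.findFrom s ['"', '"', '"'] (((PySem.Chars.findFrom s ['"', '"', '"'] (i : Int)).toNat + 3 : Nat) : Int)).toNat + 3) := ih
    rw [removeDocLoopA.eq_def, removeDocGoB.eq_def]
    simp only [Int.reduceEq, reduceIte, dif_neg H0, dif_pos H1]
    rw [removeDocLoopA.eq_def]
    simp only [Int.reduceEq, reduceIte, dif_neg Hc]
    rw [IH, List.append_assoc]
  · intro i n1 n2 h0 h1 c hc result
    have H0 : ¬(PySem.Chars.findFrom s ['"', '"', '"'] (i : Int) = -1 ∧ PySem.Chars.findFrom s ['\'', '\'', '\''] (i : Int) = -1) := h0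
    have H1 : ¬(PySem.Chars.findFrom s ['\'', '\'', '\''] (i : Int) = -1 ∨ PySem.Chars.findFrom s ['"', '"', '"'] (i : Int) ≠ -1 ∧ PySem.Chars.findFrom s ['"', '"', '"'] (i : Int) < PySem.Chars.findFrom s ['\'', '\'', '\''] (i : Int)) := h1
    have Hc : PySem.Chars.findFrom s ['\'', '\'', '\''] (((PySem.Chars.findFrom s ['\'', '\'', '\''] (i : Int)).toNat + 3 : Nat) : Int) = -1 := hc
    rw [removeDocLoopA.eq_def, removeDocGoB.eq_def]
    simp only [Int.reduceEq, reduceIte, dif_neg H0, dif_neg H1]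
    rw [removeDocLoopA.eq_def]
    simp only [Int.reduceEq, reduceIte, dif_pos Hc]
  · intro i n1 n2 h0 h1 c hc ih result
    have H0 : ¬(PySem.Chars.findFrom s ['"', '"', '"'] (i : Int) = -1 ∧ PySem.Chars.findFrom s ['\'', '\'', '\''] (i : Int) = -1) := h0
    have H1 : ¬(PySem.Chars.findFrom s ['\'', '\'', '\''] (i : Int) = -1 ∨ PySem.Chars.findFrom s ['"', '"', '"'] (i : Int) ≠ -1 ∧ PySem.Chars.findFrom s ['"', '"', '"'] (i : Int) < PySem.Chars.findFrom s ['\'', '\'', '\''] (i : Int)) := h1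
    have Hc : PySem.Chars.findFrom s ['\'', '\'', '\''] (((PySem.Chars.findFrom s ['\'', '\'', '\''] (i : Int)).toNat + 3 : Nat) : Int) ≠ -1 := hc
    have IH : ∀ r, removeDocLoopA s 2 ((PySem.Chars.findFrom s ['\'', '\'', '\''] (((PySem.Chars.findFrom s ['\'', '\'', '\''] (i : Int)).toNat + 3 : Nat) : Int)).toNat + 3) r =
        r ++ removeDocGoB s ((PySem.Chars.findFrom s ['\'', '\'', '\''] (((PySem.Chars.findFrom s ['\'', '\'', '\''] (i : Int)).toNat + 3 : Nat) : Int)).toNat + 3) := ih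
    rw [removeDocLoopA.eq_def, removeDocGoB.eq_def]
    simp only [Int.reduceEq, reduceIte, dif_neg H0, dif_neg H1]
    rw [removeDocLoopA.eq_def]
    simp only [Int.reduceEq, reduceIte, dif_neg Hc]
    rw [IH, List.append_assoc]

-- ===== VERDICT (by name: the statement is the Claim_ definition above) =====
theorem remove_docstrings_spec : Claim_equal_remove_docstrings := by
  intro s _
  unfold Spec_remove_docstrings remove_docstrings remove_docstrings_alt
  rw [loopA_eq_goB]
  simp
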